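-- pv_equiv track=rewrite | github.com/Senseles5/Test | 整合专家系统.py | ConvertTo256
-- ===== SOURCE A (Python) =====
-- def ConvertTo256(str_str):
--     ret = 0
--     base = 1
--     str_len = len(str_str)
--     for i in range(str_len - 1, -1, -1):
--         ret += base * ord(str_str[i])
--         base *= 256
--     return ret
-- ===== SOURCE B (Python) =====
-- def ConvertTo256(str_str):
--     ret = 0
--     for c in str_str:
--         ret = ret * 256 + ord(c)
--     return ret
-- ===== Notes on version B (the rewrite author's own statement) =====
-- stated objective: idiomatic
-- what changed: Replaces the backward indexed loop that maintains a separate base-power accumulator with a forward Horner fold keeping only the running value (ret = ret*256 + ord(c)).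
import Mathlib
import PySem

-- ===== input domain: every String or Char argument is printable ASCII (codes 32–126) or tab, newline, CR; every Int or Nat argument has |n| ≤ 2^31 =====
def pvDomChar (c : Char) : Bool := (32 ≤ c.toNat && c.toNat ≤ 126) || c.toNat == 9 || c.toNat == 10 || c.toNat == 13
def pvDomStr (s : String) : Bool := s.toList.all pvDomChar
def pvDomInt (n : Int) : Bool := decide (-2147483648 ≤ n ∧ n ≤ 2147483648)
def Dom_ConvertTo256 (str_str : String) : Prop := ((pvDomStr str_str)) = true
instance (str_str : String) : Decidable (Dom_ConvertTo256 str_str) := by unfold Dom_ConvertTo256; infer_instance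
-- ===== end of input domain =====

-- B replaces A's backward indexed loop with its base-power accumulator by a forward Horner fold
-- that keeps only the running value (idiomatic; same cost).

-- ===== PORT A =====
-- Backward loop over indices str_len-1 .. 0, state (ret, base).
-- str_str[i] is ported with pyGetD: every index the loop produces is in range, so Python never raises.
def ConvertTo256 (str_str : String) : Int :=
  let cs := str_str.toList
  let str_len : Int := cs.length
  let st := (PySem.List.pyRange (str_len - 1) (-1) (-1)).foldl
    (fun (st : Int × Int) i =>
      (st.1 + st.2 * ((PySem.List.pyGetD cs i ' ').toNat : Int), st.2 * 256))
    (0, 1)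
  st.1

-- ===== PORT B =====
def ConvertTo256_alt (str_str : String) : Int :=
  str_str.toList.foldl (fun ret c => ret * 256 + (c.toNat : Int)) 0

-- ===== PRECONDITION & SPEC =====
def Spec_ConvertTo256 (str_str : String) (out : Int) : Prop := out = ConvertTo256_alt str_str
instance (str_str : String) (out : Int) : Decidable (Spec_ConvertTo256 str_str out) := by unfold Spec_ConvertTo256; infer_instance

-- ===== CLAIM (what is proved, stated in full; the proofs are below) =====
def Claim_equal_ConvertTo256 : Prop := ∀ (str_str : String), Dom_ConvertTo256 str_str → Spec_ConvertTo256 str_str (ConvertTo256 str_str)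

-- ===== LEMMAS AND PROOFS =====

-- Horner value of a character list (B's fold, generalized over the accumulator).
theorem horner_append (cs : List Char) (c : Char) (r : Int) :
    (cs ++ [c]).foldl (fun ret c => ret * 256 + (c.toNat : Int)) r
      = (cs.foldl (fun ret c => ret * 256 + (c.toNat : Int)) r) * 256 + c.toNat := by
  simp

-- A's backward loop, generalized over (ret, base), computes ret + base * Horner(cs).
theorem loopA_eq (cs : List Char) (ret base : Int) :
    ((PySem.List.pyRange ((cs.length : Int) - 1) (-1) (-1)).foldl
      (fun (st : Int × Int) i =>
        (st.1 + st.2 * ((PySem.List.pyGetD cs i ' ').toNat : Int), st.2 * 256))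
      (ret, base)).1
      = ret + base * cs.foldl (fun r c => r * 256 + (c.toNat : Int)) 0 := by
  induction cs using List.reverseRecOn generalizing ret base with
  | nil =>
      simp [PySem.List.pyRange_neg_one_eq_nil]
  | append_singleton ds c ih =>
      have hlen : ((ds ++ [c]).length : Int) - 1 = (ds.length : Int) := by
        simp
      rw [hlen, PySem.List.pyRange_neg_one_cons (by omega)]
      simp only [List.foldl_cons]
      have hget : PySem.List.pyGetD (ds ++ [c]) (ds.length : Int) ' ' = c := by
        rw [PySem.List.pyGetD_natCast]
        simp
      rw [hget]
      have hcong :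
          (PySem.List.pyRange ((ds.length : Int) - 1) (-1) (-1)).foldl
            (fun (st : Int × Int) i =>
              (st.1 + st.2 * ((PySem.List.pyGetD (ds ++ [c]) i ' ').toNat : Int), st.2 * 256))
            (ret + base * (c.toNat : Int), base * 256)
          = (PySem.List.pyRange ((ds.length : Int) - 1) (-1) (-1)).foldl
            (fun (st : Int × Int) i =>
              (st.1 + st.2 * ((PySem.List.pyGetD ds i ' ').toNat : Int), st.2 * 256))
            (ret + base * (c.toNat : Int), base * 256) := by
        apply PySem.List.foldl_congr_mem
        intro st i hi
        have hmem := (PySem.List.mem_pyRange_neg_one).1 hi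
        have h0 : 0 ≤ i := by omega
        have h1 : i < (ds.length : Int) := by omega
        have : PySem.List.pyGetD (ds ++ [c]) i ' ' = PySem.List.pyGetD ds i ' ' := by
          rw [PySem.List.pyGetD_eq_getElem (ds ++ [c]) ' ' h0 (by simp; omega),
              PySem.List.pyGetD_eq_getElem ds ' ' h0 (by exact_mod_cast h1)]
          rw [List.getElem_append_left]
        rw [this]
      rw [hcong, ih, horner_append]
      ring

-- ===== VERDICT (by name: the statement is the Claim_ definition above) =====
theorem ConvertTo256_spec : Claim_equal_ConvertTo256 := by
  intro s _
  show ConvertTo256 s = ConvertTo256_alt s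
  unfold ConvertTo256 ConvertTo256_alt
  rw [loopA_eq]
  ring
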